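-- pv_equiv track=rewrite | github.com/taehee-kim-dev/Problem-solving | Programmers/Kakao/Level2/2018_KAKAO_BLIND_RECRUITMENT/Just_that_song.py | str_to_note_list
-- ===== SOURCE A (Python) =====
-- def str_to_note_list(notes):
--     notes_in_list = []
--     note_index = 0
--     while note_index <= len(notes) - 1:
--
--         one_note = notes[note_index]
--
--         if note_index <= len(notes) - 2 and notes[note_index + 1] == '#':
--             one_note += '#'
--             note_index += 1
--
--         notes_in_list.append(one_note)
--
--         note_index += 1
--     return notes_in_list
-- ===== SOURCE B (Python) =====
-- import re
--
-- def str_to_note_list(notes):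
--     # one pass driven by the regex engine: each char plus optional trailing '#'
--     return re.findall(r'.#?', notes, re.DOTALL)
-- ===== Notes on version B (the rewrite author's own statement) =====
-- stated objective: idiomatic
-- what changed: Replaced the index-driven while loop with manual lookahead and double increment by a single re.findall(r'.#?', notes, re.DOTALL) that lets the regex engine group each character with an optional trailing sharp.
import Mathlib
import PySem

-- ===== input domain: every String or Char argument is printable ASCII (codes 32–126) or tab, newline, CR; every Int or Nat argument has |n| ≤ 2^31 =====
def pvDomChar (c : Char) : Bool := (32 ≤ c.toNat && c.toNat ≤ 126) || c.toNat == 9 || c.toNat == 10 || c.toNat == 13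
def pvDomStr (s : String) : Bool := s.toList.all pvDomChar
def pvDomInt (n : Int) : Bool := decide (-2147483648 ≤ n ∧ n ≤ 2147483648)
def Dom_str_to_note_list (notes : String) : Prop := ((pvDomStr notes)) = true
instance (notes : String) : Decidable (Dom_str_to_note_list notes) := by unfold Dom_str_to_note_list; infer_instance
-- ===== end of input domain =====

-- B replaces A's index-driven loop with lookahead and double increment by a single regex scan
-- (re.findall(r'.#?', notes, re.DOTALL)); the objective is a more idiomatic one-liner, not speed.

-- ===== PORT A =====
-- A's while loop: index i over notes, lookahead for '#', double increment; list appended at the back.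
def strToNoteListLoop (cs : List Char) (i : Nat) (acc : List String) : List String :=
  if h : i < cs.length then
    if h2 : i + 1 < cs.length ∧ cs[i + 1]? = some '#' then
      strToNoteListLoop cs (i + 2) (acc ++ [String.ofList [cs[i], '#']])
    else
      strToNoteListLoop cs (i + 1) (acc ++ [String.ofList [cs[i]]])
  else acc
termination_by cs.length - i

def str_to_note_list (notes : String) : List String :=
  strToNoteListLoop notes.toList 0 []

-- ===== PORT B =====
-- the regex '.#?' applied repeatedly: consume one char, grouped with a following '#' when present
def strToNoteGroups (cs : List Char) : List String :=
  match cs with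
  | [] => []
  | c :: rest =>
    if rest.head? = some '#' then String.ofList [c, '#'] :: strToNoteGroups rest.tail
    else String.ofList [c] :: strToNoteGroups rest
termination_by cs.length
decreasing_by
  · simp only [List.length_cons, List.length_tail]
    omega
  · simp

def str_to_note_list_alt (notes : String) : List String :=
  strToNoteGroups notes.toList

-- ===== PRECONDITION & SPEC =====
def Spec_str_to_note_list (notes : String) (out : List String) : Prop := out = str_to_note_list_alt notes
instance (notes : String) (out : List String) : Decidable (Spec_str_to_note_list notes out) := by unfold Spec_str_to_note_list; infer_instance

-- ===== CLAIM (what is proved, stated in full; the proofs are below) =====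
def Claim_equal_str_to_note_list : Prop := ∀ (notes : String), Dom_str_to_note_list notes → Spec_str_to_note_list notes (str_to_note_list notes)

-- ===== LEMMAS AND PROOFS =====

-- loop invariant: A's loop from index i yields acc ++ B's grouping of the suffix cs.drop i
theorem strToNoteListLoop_eq (cs : List Char) :
    ∀ n i acc, cs.length - i ≤ n →
      strToNoteListLoop cs i acc = acc ++ strToNoteGroups (cs.drop i) := by
  intro n
  induction n with
  | zero =>
    intro i acc hle
    have hge : cs.length ≤ i := by omega
    rw [strToNoteListLoop]
    simp [List.drop_eq_nil_of_le hge, Nat.not_lt.mpr hge, strToNoteGroups]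
  | succ n ih =>
    intro i acc hle
    rw [strToNoteListLoop]
    by_cases h : i < cs.length
    · simp only [h, dif_pos]
      have hdrop : cs.drop i = cs[i] :: cs.drop (i + 1) := (List.getElem_cons_drop h).symm
      by_cases h2 : i + 1 < cs.length ∧ cs[i + 1]? = some '#'
      · rw [dif_pos h2, ih (i + 2) _ (by omega)]
        have hdrop2 : cs.drop (i + 1) = cs[i + 1] :: cs.drop (i + 2) :=
          (List.getElem_cons_drop h2.1).symm
        have hsharp : cs[i + 1] = '#' := by
          have h3 := h2.2
          rw [List.getElem?_eq_getElem h2.1] at h3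
          exact (Option.some.injEq _ _).mp h3
        rw [hdrop, strToNoteGroups, hdrop2]
        simp [hsharp]
      · rw [dif_neg h2, ih (i + 1) _ (by omega)]
        rw [hdrop, strToNoteGroups]
        have hh : ¬ (cs.drop (i + 1)).head? = some '#' := by
          by_cases h1 : i + 1 < cs.length
          · rw [(List.getElem_cons_drop h1).symm]
            simp only [List.head?_cons, Option.some.injEq]
            intro hc
            exact h2 ⟨h1, by rw [List.getElem?_eq_getElem h1, hc]⟩
          · rw [List.drop_eq_nil_of_le (by omega)]; simp
        rw [if_neg hh]
        simp
    · simp only [h, dif_neg, not_false_iff]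
      rw [List.drop_eq_nil_of_le (by omega)]
      simp [strToNoteGroups]

-- ===== VERDICT (by name: the statement is the Claim_ definition above) =====
theorem str_to_note_list_spec : Claim_equal_str_to_note_list := by
  intro notes _
  unfold Spec_str_to_note_list str_to_note_list str_to_note_list_alt
  simpa using strToNoteListLoop_eq notes.toList notes.toList.length 0 [] (by omega)
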